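-- pv_equiv track=rewrite | github.com/tomgun/virtual-tree | .agentic/tools/continue_here.py | get_recent_journal_entries
-- ===== SOURCE A (Python) =====
-- def get_recent_journal_entries(journal_content, max_entries=5):
--     """Extract the last N journal entries."""
--     if not journal_content:
--         return ""
--
--     # Split by heading markers (## )
--     entries = []
--     current_entry = []
--
--     for line in journal_content.split('\n'):
--         if line.startswith('## '):
--             if current_entry:
--                 entries.append('\n'.join(current_entry))
--             current_entry = [line]
--         else:
--             if current_entry:
--                 current_entry.append(line)
--
--     if current_entry:
--         entries.append('\n'.join(current_entry))
--
--     # Return last N entries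
--     recent = entries[-max_entries:] if len(entries) > max_entries else entries
--     return '\n\n'.join(recent)
-- ===== SOURCE B (Python) =====
-- def get_recent_journal_entries(journal_content, max_entries=5):
--     """Extract the last N journal entries."""
--     if not journal_content:
--         return ""
--     lines = journal_content.split('\n')
--     starts = [i for i, line in enumerate(lines) if line.startswith('## ')]
--     ends = starts[1:] + [len(lines)]
--     entries = ['\n'.join(lines[s:e]) for s, e in zip(starts, ends)]
--     return '\n\n'.join(entries[-max_entries:])
-- ===== Notes on version B (the rewrite author's own statement) =====
-- stated objective: alternative
-- what changed: A scans lines with a mutable (entries, current_entry) state machine flushing on each heading; B collects the indices of all markdown heading lines in one pass and builds each entry by slicing the line list between consecutive heading indices, then slices the last N unconditionally (entries[-max_entries:] equals A's guarded slice for every max_entries).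
import Mathlib
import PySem

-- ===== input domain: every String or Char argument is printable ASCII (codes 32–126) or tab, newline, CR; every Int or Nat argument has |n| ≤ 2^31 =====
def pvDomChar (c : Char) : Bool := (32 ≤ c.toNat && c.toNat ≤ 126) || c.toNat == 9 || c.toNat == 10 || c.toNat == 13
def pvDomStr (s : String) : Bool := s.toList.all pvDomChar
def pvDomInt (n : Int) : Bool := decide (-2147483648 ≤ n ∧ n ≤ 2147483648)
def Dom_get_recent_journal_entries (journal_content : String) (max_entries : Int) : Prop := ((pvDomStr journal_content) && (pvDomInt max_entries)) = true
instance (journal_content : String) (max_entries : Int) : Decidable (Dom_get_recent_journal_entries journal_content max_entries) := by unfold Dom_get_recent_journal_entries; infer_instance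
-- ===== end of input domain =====

-- B replaces A's stateful line-by-line fold with one pass collecting heading indices and
-- slicing the line list between consecutive headings (objective: alternative decomposition).

-- ===== PORT A =====
def pvStepA (st : List String × List String) (line : String) : List String × List String :=
  if PySem.Str.startswith line "## " then
    (if st.2 ≠ [] then st.1 ++ [PySem.Str.join "\n" st.2] else st.1, [line])
  else
    (st.1, if st.2 ≠ [] then st.2 ++ [line] else st.2)

def pvFinishA (st : List String × List String) : List String :=
  if st.2 ≠ [] then st.1 ++ [PySem.Str.join "\n" st.2] else st.1

def get_recent_journal_entries (journal_content : String) (max_entries : Int) : String :=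
  if journal_content = "" then ""
  else
    let lines := (PySem.Str.split? journal_content "\n").getD []
    let entries := pvFinishA (lines.foldl pvStepA ([], []))
    let recent := if (entries.length : Int) > max_entries then
        PySem.List.slice entries (some (-max_entries)) none else entries
    PySem.Str.join "\n\n" recent

-- ===== PORT B =====
def pvStarts (lines : List String) : List Int :=
  (PySem.List.enumerate lines).filterMap
    (fun p => if PySem.Str.startswith p.2 "## " then some p.1 else none)

def get_recent_journal_entries_alt (journal_content : String) (max_entries : Int) : String :=
  if journal_content = "" then ""
  else
    let lines := (PySem.Str.split? journal_content "\n").getD []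
    let starts := pvStarts lines
    let ends := starts.tail ++ [(lines.length : Int)]
    let entries := (starts.zip ends).map
      (fun p => PySem.Str.join "\n" (PySem.List.slice lines (some p.1) (some p.2)))
    PySem.Str.join "\n\n" (PySem.List.slice entries (some (-max_entries)) none)

-- ===== PRECONDITION & SPEC =====
def Spec_get_recent_journal_entries (journal_content : String) (max_entries : Int) (out : String) : Prop := out = get_recent_journal_entries_alt journal_content max_entries
instance (journal_content : String) (max_entries : Int) (out : String) : Decidable (Spec_get_recent_journal_entries journal_content max_entries out) := by unfold Spec_get_recent_journal_entries; infer_instance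

-- ===== CLAIM (what is proved, stated in full; the proofs are below) =====
def Claim_equal_get_recent_journal_entries : Prop := ∀ (journal_content : String) (max_entries : Int), Dom_get_recent_journal_entries journal_content max_entries → Spec_get_recent_journal_entries journal_content max_entries (get_recent_journal_entries journal_content max_entries)

-- ===== LEMMAS AND PROOFS =====

def isH (l : String) : Bool := PySem.Str.startswith l "## "

def jn (c : List String) : String := PySem.Str.join "\n" c

-- heading positions, Nat-indexed, structurally
def startsN : List String → List Nat
  | [] => []
  | l :: ls => if isH l then 0 :: (startsN ls).map (· + 1) else (startsN ls).map (· + 1)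

-- B's entries, in drop/take form
def entN (ls : List String) : List String :=
  ((startsN ls).zip ((startsN ls).tail ++ [ls.length])).map
    (fun p => jn ((ls.drop p.1).take (p.2 - p.1)))

-- the grouping both programs compute
def contGroups : List String → List String → List (List String)
  | c, [] => [c]
  | c, l :: ls => if isH l then c :: contGroups [l] ls else contGroups (c ++ [l]) ls

def allGroups : List String → List (List String)
  | [] => []
  | l :: ls => if isH l then contGroups [l] ls else allGroups ls

theorem starts_aux (ls : List String) : ∀ (s : Int),
    (PySem.List.enumerate ls s).filterMap
      (fun p => if PySem.Str.startswith p.2 "## " then some p.1 else none)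
      = (startsN ls).map (fun n : Nat => (n : Int) + s) := by
  induction ls with
  | nil => intro s; simp [PySem.List.enumerate_nil, startsN]
  | cons l ls ih =>
    intro s
    simp only [PySem.List.enumerate_cons, List.filterMap_cons]
    by_cases h : isH l
    · simp only [isH] at h
      simp only [startsN, isH, h, if_true, ih (s + 1), List.map_cons, List.map_map,
        Function.comp_def, List.cons.injEq]
      refine ⟨by push_cast; ring, ?_⟩
      apply List.map_congr_left; intro n _; push_cast; ring
    · simp only [isH] at h
      simp only [startsN, isH, h, if_false, Bool.false_eq_true, ih (s + 1), List.map_map,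
        Function.comp_def]
      apply List.map_congr_left; intro n _; push_cast; ring

theorem pvStarts_eq (ls : List String) : pvStarts ls = (startsN ls).map (fun n : Nat => (n : Int)) := by
  have := starts_aux ls 0
  simpa [pvStarts] using this

theorem entB_eq_entN (ls : List String) :
    ((pvStarts ls).zip ((pvStarts ls).tail ++ [(ls.length : Int)])).map
      (fun p => PySem.Str.join "\n" (PySem.List.slice ls (some p.1) (some p.2))) = entN ls := by
  rw [pvStarts_eq]
  have htail : ((startsN ls).map (fun n : Nat => (n : Int))).tail
      = ((startsN ls).tail).map (fun n : Nat => (n : Int)) := by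
    cases startsN ls <;> simp
  rw [htail]
  have happ : ((startsN ls).tail).map (fun n : Nat => (n : Int)) ++ [(ls.length : Int)]
      = ((startsN ls).tail ++ [ls.length]).map (fun n : Nat => (n : Int)) := by simp
  rw [happ, List.zip_map, List.map_map]
  unfold entN jn
  apply List.map_congr_left
  intro p _
  simp [PySem.List.slice_natCast]

-- shifting a slice description through a cons
theorem shift_lem (ls : List String) (l : String) :
    ((((startsN ls).map (· + 1)).zip ((((startsN ls).map (· + 1)).tail) ++ [ls.length + 1])).map
      (fun p => jn (((l :: ls).drop p.1).take (p.2 - p.1)))) = entN ls := by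
  have htail : ((startsN ls).map (· + 1)).tail = ((startsN ls).tail).map (· + 1) := by
    cases startsN ls <;> simp
  rw [htail]
  have happ : ((startsN ls).tail).map (· + 1) ++ [ls.length + 1]
      = ((startsN ls).tail ++ [ls.length]).map (· + 1) := by simp
  rw [happ, List.zip_map, List.map_map]
  unfold entN
  apply List.map_congr_left
  intro p _
  simp [Nat.succ_sub_succ]

theorem startsN_nil_noHead (ls : List String) (h : startsN ls = []) :
    ls.takeWhile (fun x => !isH x) = ls ∧ ls.dropWhile (fun x => !isH x) = [] := by
  induction ls with
  | nil => simp
  | cons l ls ih =>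
    by_cases hl : isH l
    · simp [startsN, hl] at h
    · simp [startsN, hl] at h
      have := ih h
      simp [hl, this.1, this.2]

theorem startsN_head_takeWhile (ls : List String) : ∀ (s0 : Nat) (rest : List Nat),
    startsN ls = s0 :: rest → ls.take s0 = ls.takeWhile (fun x => !isH x) := by
  induction ls with
  | nil => intro s0 rest h; simp [startsN] at h
  | cons l ls ih =>
    intro s0 rest h
    by_cases hl : isH l
    · simp [startsN, hl] at h
      rcases h with ⟨rfl, -⟩
      simp [hl]
    · simp [startsN, hl] at h
      cases hS : startsN ls with
      | nil => rw [hS] at h; simp at h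
      | cons s0' rest' =>
        rw [hS] at h
        simp only [List.map_cons, List.cons.injEq] at h
        rcases h with ⟨rfl, -⟩
        simp [hl, List.take_succ_cons, ih s0' rest' hS]

theorem allGroups_dropWhile (ls : List String) :
    allGroups (ls.dropWhile (fun x => !isH x)) = allGroups ls := by
  induction ls with
  | nil => simp
  | cons l ls ih =>
    by_cases hl : isH l
    · simp [hl]
    · simp [hl, ih, allGroups]

theorem contGroups_char (ls : List String) : ∀ (c : List String),
    contGroups c ls = (c ++ ls.takeWhile (fun x => !isH x))
      :: allGroups (ls.dropWhile (fun x => !isH x)) := by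
  induction ls with
  | nil => intro c; simp [contGroups, allGroups]
  | cons l ls ih =>
    intro c
    by_cases hl : isH l
    · simp [contGroups, hl, allGroups]
    · simp only [contGroups, hl, ih (c ++ [l])]
      simp [hl]

theorem entN_eq_allGroups (ls : List String) : entN ls = (allGroups ls).map jn := by
  induction ls with
  | nil => simp [entN, startsN, allGroups]
  | cons l ls ih =>
    by_cases hl : isH l
    · cases hS : startsN ls with
      | nil =>
        have hnh := startsN_nil_noHead ls hS
        unfold entN
        simp only [startsN, hl, if_true, hS, List.map_nil, List.tail_cons, List.nil_append,
          List.zip_cons_cons, List.zip_nil_left, List.map_cons, List.map_nil]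
        unfold allGroups
        simp only [hl, if_true, contGroups_char ls [l], hnh.1, hnh.2]
        simp [allGroups]
      | cons s0 rest =>
        unfold entN
        simp only [startsN, hl, if_true, hS, List.map_cons, List.tail_cons, List.length_cons,
          List.cons_append, List.zip_cons_cons, List.map_cons]
        have hrest : (((s0 + 1) :: rest.map (· + 1)).zip (rest.map (· + 1) ++ [ls.length + 1])).map
            (fun p => jn (((l :: ls).drop p.1).take (p.2 - p.1))) = entN ls := by
          have := shift_lem ls l
          rw [hS] at this
          simpa using this
        rw [hrest, ih]
        have hAG : allGroups (l :: ls) = contGroups [l] ls := by simp [allGroups, hl]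
        rw [hAG, contGroups_char ls [l], ← allGroups_dropWhile ls]
        simp only [List.map_cons]
        congr 1
        have htake := startsN_head_takeWhile ls s0 rest hS
        simp [List.take_succ_cons, ← htake]
    · have hstep : startsN (l :: ls) = (startsN ls).map (· + 1) := by simp [startsN, hl]
      unfold entN
      rw [hstep, List.length_cons, shift_lem ls l, ih]
      have hAG : allGroups (l :: ls) = allGroups ls := by simp [allGroups, hl]
      rw [hAG]

theorem foldA_cont (ls : List String) : ∀ (e c : List String), c ≠ [] →
    pvFinishA (ls.foldl pvStepA (e, c)) = e ++ (contGroups c ls).map jn := by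
  induction ls with
  | nil => intro e c hc; simp [pvFinishA, contGroups, hc, jn]
  | cons l ls ih =>
    intro e c hc
    by_cases hl : isH l
    · have : pvStepA (e, c) l = (e ++ [PySem.Str.join "\n" c], [l]) := by
        simp [pvStepA, isH] at hl ⊢; simp [hl, hc]
      simp only [List.foldl_cons, this, ih _ [l] (by simp), contGroups, hl, if_true]
      simp [jn]
    · have : pvStepA (e, c) l = (e, c ++ [l]) := by
        simp [pvStepA, isH] at hl ⊢; simp [hl, hc]
      simp only [List.foldl_cons, this, ih _ (c ++ [l]) (by simp), contGroups, hl]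
      simp

theorem foldA_eq (ls : List String) :
    pvFinishA (ls.foldl pvStepA ([], [])) = (allGroups ls).map jn := by
  induction ls with
  | nil => simp [pvFinishA, allGroups]
  | cons l ls ih =>
    by_cases hl : isH l
    · have : pvStepA ([], []) l = ([], [l]) := by
        simp [pvStepA, isH] at hl ⊢; simp [hl]
      simp only [List.foldl_cons, this, foldA_cont ls [] [l] (by simp), allGroups, hl, if_true]
      simp
    · have : pvStepA ([], []) l = ([], []) := by
        simp [pvStepA, isH] at hl ⊢; simp [hl]
      simp only [List.foldl_cons, this, ih, allGroups, hl]
      simp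

theorem guard_slice (xs : List String) (m : Int) :
    (if (xs.length : Int) > m then PySem.List.slice xs (some (-m)) none else xs)
      = PySem.List.slice xs (some (-m)) none := by
  by_cases h : (xs.length : Int) > m
  · simp [h]
  · simp only [h, if_false]
    rw [PySem.List.slice_some_none]
    have hm : 0 ≤ m := by omega
    have hkey : PySem.List.clampIdx xs.length (-m) = 0 := by
      rcases Int.eq_ofNat_of_zero_le hm with ⟨k, rfl⟩
      cases k with
      | zero => simp [PySem.List.clampIdx]
      | succ k' =>
        have hk : 0 < k' + 1 := Nat.succ_pos k'
        rw [PySem.List.clampIdx_neg_natCast _ _ hk]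
        omega
    simp [hkey]

theorem main_eq (jc : String) (m : Int) :
    get_recent_journal_entries jc m = get_recent_journal_entries_alt jc m := by
  unfold get_recent_journal_entries get_recent_journal_entries_alt
  by_cases h : jc = ""
  · simp [h]
  · simp only [h, if_false]
    set ls := (PySem.Str.split? jc "\n").getD [] with hls
    rw [foldA_eq, ← entN_eq_allGroups, ← entB_eq_entN, guard_slice]

-- ===== VERDICT (by name: the statement is the Claim_ definition above) =====
theorem get_recent_journal_entries_spec : Claim_equal_get_recent_journal_entries := by
  intro jc m _
  unfold Spec_get_recent_journal_entries
  exact main_eq jc m
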